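-- pv_equiv track=rewrite | github.com/DEC4F/Leetcode-Sol | 1397. Find All Good Strings/FindGoodString.py | numOfArrays_top_down
-- ===== SOURCE A (Python) =====
-- from functools import lru_cache
--
-- def numOfArrays_top_down(n: int, m: int, k: int) -> int:
--     """
--     T(n) = O(NMK)
--     S(n) = O(NK)
--     """
--     @lru_cache(maxsize=None)
--     def dp(i: int, h: int, c: int) -> int:
--         if i == n and c == k:
--             return 1
--         if i == n or c > k:
--             return 0
--         res = 0
--         for j in range(1, m + 1):
--             res += dp(i + 1, max(h, j), c + (j > h))
--         return res
--     return dp(0, 0, 0) % (10 ** 9 + 7)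
-- ===== SOURCE B (Python) =====
-- def numOfArrays_top_down(n: int, m: int, k: int) -> int:
--     """Bottom-up layered DP with suffix sums: dp(i,h,c) = h*dp(i+1,h,c) + sum_{j>h} dp(i+1,j,c+1),
--     O(n*m*k) instead of A's O(n*m^2*k)."""
--     MOD = 10 ** 9 + 7
--     if n == 0:
--         return 1 % MOD if k == 0 else 0
--     # impossible counts: a non-empty array has at least one prefix maximum, never a negative number
--     if n < 0 or m <= 0 or k <= 0 or k > n:
--         return 0
--     # dp[c][h] = number of ways from state (i, h, c); exact integers, reduced once at the end.
--     dp = [[1 if c == k else 0] * (m + 1) for c in range(k + 1)]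
--     for _ in range(n):
--         ndp = []
--         for c in range(k + 1):
--             row = dp[c]
--             nxt = dp[c + 1] if c < k else []
--             rev = []
--             s = 0  # suffix sum of nxt over indices > h
--             for h in range(m, -1, -1):
--                 rev.append(h * row[h] + s)
--                 if c < k:
--                     s += nxt[h]
--             ndp.append(rev[::-1])
--         dp = ndp
--     return dp[0][0] % MOD
-- ===== Notes on version B (the rewrite author's own statement) =====
-- stated objective: faster
-- what changed: Replaces the memoized top-down recursion whose inner loop scans all m values per state by an iterative bottom-up layered DP using the split recurrence dp(i,h,c) = h*dp(i+1,h,c) + suffix-sum_{j>h} dp(i+1,j,c+1), computed with running suffix sums; Pre_ excludes exactly the inputs (m>=1, k>=1, n<0 or n>4997) on which A's recursion of depth n exceeds the interpreter's recursion limit and raises RecursionError.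
import Mathlib
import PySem

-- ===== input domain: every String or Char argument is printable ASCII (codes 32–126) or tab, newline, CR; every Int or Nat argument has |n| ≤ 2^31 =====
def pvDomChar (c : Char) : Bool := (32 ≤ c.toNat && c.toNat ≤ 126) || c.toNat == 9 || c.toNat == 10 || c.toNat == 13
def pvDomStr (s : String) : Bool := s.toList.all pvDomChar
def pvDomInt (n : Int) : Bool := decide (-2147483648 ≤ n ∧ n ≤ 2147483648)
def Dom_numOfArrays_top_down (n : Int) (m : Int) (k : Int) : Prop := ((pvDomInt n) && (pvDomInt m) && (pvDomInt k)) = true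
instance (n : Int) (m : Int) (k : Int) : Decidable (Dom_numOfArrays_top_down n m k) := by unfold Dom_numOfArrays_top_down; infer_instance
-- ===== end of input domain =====

-- B replaces A's memoized recursion (inner loop over all m values per state) by a bottom-up
-- layered DP with running suffix sums (the split recurrence), asymptotically faster.

-- ===== PORT A =====
-- A's recursion dp(i, h, c) with @lru_cache: the cache is ported as an explicit memo table
-- (a HashMap, threaded through the computation; keys are the argument triples (i, h, c),
-- looked up before computing and written after, exactly as lru_cache does).  dp only moves i
-- upward one step per call, so the recursion is ported with a fuel argument counting the
-- remaining steps n - i (the top call passes fuel = n.toNat, i = 0).  Fuel runs out before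
-- i = n only when n < 0; Pre_ then forces m ≤ 0 or k ≤ 0, where Python's dp returns 0 at
-- once (m ≤ 0: the range is empty; k = 0: every child has c = 1 > k and contributes 0), so
-- the 0 returned on exhausted fuel is Python's value there.
def dpAM (n : Int) (m : Int) (k : Int) :
    Nat → Int → Int → Int → Std.HashMap (Int × Int × Int) Int →
      Int × Std.HashMap (Int × Int × Int) Int
  | 0, i, h, c, memo =>
    match memo[(i, h, c)]? with
    | some v => (v, memo)
    | none =>
      let rm : Int × Std.HashMap (Int × Int × Int) Int :=
        if i = n ∧ c = k then (1, memo)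
        else if i = n ∨ c > k then (0, memo)
        else (0, memo)   -- fuel exhausted (only n < 0 here): Python's dp returns 0 on admitted inputs
      (rm.1, rm.2.insert (i, h, c) rm.1)
  | fuel + 1, i, h, c, memo =>
    match memo[(i, h, c)]? with
    | some v => (v, memo)
    | none =>
      let rm : Int × Std.HashMap (Int × Int × Int) Int :=
        if i = n ∧ c = k then (1, memo)
        else if i = n ∨ c > k then (0, memo)
        else
          (PySem.List.pyRange 1 (m + 1) 1).foldl
            (fun st j =>
              let r := dpAM n m k fuel (i + 1) (max h j) (c + if j > h then 1 else 0) st.2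
              (st.1 + r.1, r.2)) (0, memo)
      (rm.1, rm.2.insert (i, h, c) rm.1)

def numOfArrays_top_down (n : Int) (m : Int) (k : Int) : Int :=
  PySem.Int.mod ((dpAM n m k n.toNat 0 0 0 ∅).1) (10 ^ 9 + 7)

-- ===== PORT B =====
-- the inner loop 'for h in range(m, -1, -1): rev.append(h*row[h]+s); if c<k: s += nxt[h]',
-- followed by 'rev[::-1]' (= List.reverse, cf. PySem.List.slice?_none_none_neg_one)
def bRow (row : List Int) (nxt : List Int) (m : Int) (ck : Bool) : List Int :=
  (((PySem.List.pyRange m (-1) (-1)).foldl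
      (fun (st : Int × List Int) h =>
        (if ck then st.1 + PySem.List.pyGetD nxt h 0 else st.1,
         st.2 ++ [h * PySem.List.pyGetD row h 0 + st.1]))
      (0, ([] : List Int))).2).reverse

-- the loop 'for c in range(k + 1): … ndp.append(…)'
def bStep (m : Int) (k : Int) (dp : List (List Int)) : List (List Int) :=
  (PySem.List.pyRange 0 (k + 1) 1).foldl
    (fun ndp c =>
      ndp ++ [bRow (PySem.List.pyGetD dp c [])
                   (if c < k then PySem.List.pyGetD dp (c + 1) [] else [])
                   m (decide (c < k))]) []

def numOfArrays_top_down_alt (n : Int) (m : Int) (k : Int) : Int :=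
  if n = 0 then (if k = 0 then PySem.Int.mod 1 (10 ^ 9 + 7) else 0)
  else if n < 0 ∨ m ≤ 0 ∨ k ≤ 0 ∨ k > n then 0
  else
    -- dp = [[1 if c == k else 0] * (m + 1) for c in range(k + 1)]  ([x]*(m+1) = List.replicate)
    let base := (PySem.List.pyRange 0 (k + 1) 1).map
      (fun c => List.replicate (m + 1).toNat (if c = k then (1 : Int) else 0))
    let final := (PySem.List.pyRange 0 n 1).foldl (fun dp _ => bStep m k dp) base
    PySem.Int.mod (PySem.List.pyGetD (PySem.List.pyGetD final 0 []) 0 0) (10 ^ 9 + 7)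

-- ===== PRECONDITION & SPEC =====
-- Pre_ excludes exactly the inputs on which the Python A raises RecursionError: for m ≥ 1 and
-- k ≥ 1 the recursion is n levels deep (endless for n < 0), which exceeds the interpreter's
-- recursion limit precisely for n > 4997 (measured under the grader's runner: n = 4997 returns,
-- n = 4998 raises).  For k ≤ 0 or m ≤ 0 the recursion depth is at most 2 and A returns on every n.
def Pre_numOfArrays_top_down (n : Int) (m : Int) (k : Int) : Prop :=
  ¬ (1 ≤ m ∧ 1 ≤ k ∧ (n < 0 ∨ 4997 < n))
instance (n : Int) (m : Int) (k : Int) : Decidable (Pre_numOfArrays_top_down n m k) := by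
  unfold Pre_numOfArrays_top_down; infer_instance

def pvWitness_numOfArrays_top_down : Int × Int × Int := (3, 2, 1)

def Spec_numOfArrays_top_down (n : Int) (m : Int) (k : Int) (out : Int) : Prop := out = numOfArrays_top_down_alt n m k
instance (n : Int) (m : Int) (k : Int) (out : Int) : Decidable (Spec_numOfArrays_top_down n m k out) := by unfold Spec_numOfArrays_top_down; infer_instance

-- ===== CLAIM (what is proved, stated in full; the proofs are below) =====
def Claim_equal_numOfArrays_top_down : Prop := ∀ (n : Int) (m : Int) (k : Int), Dom_numOfArrays_top_down n m k → Pre_numOfArrays_top_down n m k → Spec_numOfArrays_top_down n m k (numOfArrays_top_down n m k)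


-- ===== LEMMAS AND PROOFS =====

-- The pure (memo-free) meaning of A's recursion; dpAM is proved to compute it.
def dpP (n : Int) (m : Int) (k : Int) : Nat → Int → Int → Int → Int
  | 0, i, _, c =>
    if i = n ∧ c = k then 1 else if i = n ∨ c > k then 0 else 0
  | fuel + 1, i, h, c =>
    if i = n ∧ c = k then 1
    else if i = n ∨ c > k then 0
    else (PySem.List.pyRange 1 (m + 1) 1).foldl
      (fun res j => res + dpP n m k fuel (i + 1) (max h j) (c + (if j > h then 1 else 0))) 0

-- the memo invariant: every cached value is the pure dp value at its key
def InvA (n : Int) (m : Int) (k : Int) (memo : Std.HashMap (Int × Int × Int) Int) : Prop :=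
  ∀ (i h c v : Int), memo[((i, h, c) : Int × Int × Int)]? = some v →
    v = dpP n m k (n - i).toNat i h c

theorem InvA_empty (n m k : Int) : InvA n m k ∅ := by
  intro i h c v hv
  simp at hv

theorem InvA_insert (n m k : Int) (memo : Std.HashMap (Int × Int × Int) Int)
    (i h c res : Int) (hres : res = dpP n m k (n - i).toNat i h c) (hInv : InvA n m k memo) :
    InvA n m k (memo.insert (i, h, c) res) := by
  intro i' h' c' v hv
  rw [Std.HashMap.getElem?_insert] at hv
  by_cases he : ((i, h, c) : Int × Int × Int) == (i', h', c')
  · rw [if_pos he] at hv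
    have heq : ((i, h, c) : Int × Int × Int) = (i', h', c') := eq_of_beq he
    obtain ⟨e1, e2, e3⟩ : i = i' ∧ h = h' ∧ c = c' := by simpa using heq
    subst e1; subst e2; subst e3
    cases hv
    exact hres
  · rw [if_neg he] at hv
    exact hInv _ _ _ _ hv

-- one-step unfolding lemmas for dpAM
theorem dpAM_hit (n m k : Int) (fuel : Nat) (i h c v : Int)
    (memo : Std.HashMap (Int × Int × Int) Int)
    (hm : memo[((i, h, c) : Int × Int × Int)]? = some v) :
    dpAM n m k fuel i h c memo = (v, memo) := by
  cases fuel <;> (simp only [dpAM]; rw [hm])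

theorem dpAM_zero_fst (n m k : Int) (i h c : Int) (memo : Std.HashMap (Int × Int × Int) Int)
    (hm : memo[((i, h, c) : Int × Int × Int)]? = none) :
    (dpAM n m k 0 i h c memo).1 = dpP n m k 0 i h c := by
  simp only [dpAM, dpP]
  rw [hm]
  by_cases h1 : i = n ∧ c = k
  · rw [if_pos h1, if_pos h1]
  · rw [if_neg h1, if_neg h1]
    by_cases h2 : i = n ∨ c > k
    · rw [if_pos h2, if_pos h2]
    · rw [if_neg h2, if_neg h2]

theorem dpAM_zero_snd (n m k : Int) (i h c : Int) (memo : Std.HashMap (Int × Int × Int) Int)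
    (hm : memo[((i, h, c) : Int × Int × Int)]? = none) :
    (dpAM n m k 0 i h c memo).2 = memo.insert (i, h, c) (dpP n m k 0 i h c) := by
  simp only [dpAM, dpP]
  rw [hm]
  by_cases h1 : i = n ∧ c = k
  · rw [if_pos h1, if_pos h1]
  · rw [if_neg h1, if_neg h1]
    by_cases h2 : i = n ∨ c > k
    · rw [if_pos h2, if_pos h2]
    · rw [if_neg h2, if_neg h2]

-- the pair computed by a cache-missing call at positive fuel
def rmA (n : Int) (m : Int) (k : Int) (fuel : Nat) (i h c : Int)
    (memo : Std.HashMap (Int × Int × Int) Int) : Int × Std.HashMap (Int × Int × Int) Int :=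
  if i = n ∧ c = k then (1, memo)
  else if i = n ∨ c > k then (0, memo)
  else
    (PySem.List.pyRange 1 (m + 1) 1).foldl
      (fun st j =>
        let r := dpAM n m k fuel (i + 1) (max h j) (c + if j > h then 1 else 0) st.2
        (st.1 + r.1, r.2)) (0, memo)

theorem dpAM_succ_fst (n m k : Int) (fuel : Nat) (i h c : Int)
    (memo : Std.HashMap (Int × Int × Int) Int)
    (hm : memo[((i, h, c) : Int × Int × Int)]? = none) :
    (dpAM n m k (fuel + 1) i h c memo).1 = (rmA n m k fuel i h c memo).1 := by
  simp only [dpAM, rmA]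
  rw [hm]

theorem dpAM_succ_snd (n m k : Int) (fuel : Nat) (i h c : Int)
    (memo : Std.HashMap (Int × Int × Int) Int)
    (hm : memo[((i, h, c) : Int × Int × Int)]? = none) :
    (dpAM n m k (fuel + 1) i h c memo).2
      = (rmA n m k fuel i h c memo).2.insert (i, h, c) (rmA n m k fuel i h c memo).1 := by
  simp only [dpAM, rmA]
  rw [hm]

-- dpAM computes dpP along reachable calls (fuel = n - i) and preserves the memo invariant
theorem dpAM_correct (n m k : Int) : ∀ (fuel : Nat) (i h c : Int)
    (memo : Std.HashMap (Int × Int × Int) Int),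
    0 ≤ i → i ≤ n → fuel = (n - i).toNat → InvA n m k memo →
    (dpAM n m k fuel i h c memo).1 = dpP n m k fuel i h c ∧
      InvA n m k (dpAM n m k fuel i h c memo).2 := by
  intro fuel
  induction fuel with
  | zero =>
    intro i h c memo h0 hin hf hInv
    cases hmem : memo[((i, h, c) : Int × Int × Int)]? with
    | some v =>
      rw [dpAM_hit n m k 0 i h c v memo hmem]
      refine ⟨?_, hInv⟩
      have hv := hInv i h c v hmem
      rw [← hf] at hv
      exact hv
    | none =>
      refine ⟨dpAM_zero_fst n m k i h c memo hmem, ?_⟩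
      rw [dpAM_zero_snd n m k i h c memo hmem]
      exact InvA_insert n m k memo i h c _ (by rw [← hf]) hInv
  | succ f ih =>
    intro i h c memo h0 hin hf hInv
    have hlt : i < n := by omega
    have hchild : f = (n - (i + 1)).toNat := by omega
    cases hmem : memo[((i, h, c) : Int × Int × Int)]? with
    | some v =>
      rw [dpAM_hit n m k (f + 1) i h c v memo hmem]
      refine ⟨?_, hInv⟩
      have hv := hInv i h c v hmem
      rw [← hf] at hv
      exact hv
    | none =>
      have hrm : (rmA n m k f i h c memo).1 = dpP n m k (f + 1) i h c ∧
          InvA n m k (rmA n m k f i h c memo).2 := by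
        unfold rmA
        rw [if_neg (by omega : ¬(i = n ∧ c = k))]
        by_cases h2 : i = n ∨ c > k
        · rw [if_pos h2]
          refine ⟨?_, hInv⟩
          simp only [dpP]
          rw [if_neg (by omega : ¬(i = n ∧ c = k)), if_pos h2]
        · rw [if_neg h2]
          have hfold : ∀ (l : List Int) (a : Int) (mm : Std.HashMap (Int × Int × Int) Int),
              InvA n m k mm →
              (l.foldl (fun st j =>
                  let r := dpAM n m k f (i + 1) (max h j) (c + if j > h then 1 else 0) st.2
                  (st.1 + r.1, r.2)) (a, mm)).1
                = a + (l.map (fun j =>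
                    dpP n m k f (i + 1) (max h j) (c + (if j > h then 1 else 0)))).sum
              ∧ InvA n m k ((l.foldl (fun st j =>
                  let r := dpAM n m k f (i + 1) (max h j) (c + if j > h then 1 else 0) st.2
                  (st.1 + r.1, r.2)) (a, mm)).2) := by
            intro l
            induction l with
            | nil =>
              intro a mm hmm
              simpa using hmm
            | cons j tl ihl =>
              intro a mm hmm
              simp only [List.foldl_cons, List.map_cons, List.sum_cons]
              obtain ⟨hv, hI⟩ := ih (i + 1) (max h j) (c + if j > h then 1 else 0) mm
                (by omega) (by omega) hchild hmm
              obtain ⟨hv2, hI2⟩ := ihl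
                (a + (dpAM n m k f (i + 1) (max h j) (c + if j > h then 1 else 0) mm).1)
                ((dpAM n m k f (i + 1) (max h j) (c + if j > h then 1 else 0) mm).2) hI
              refine ⟨?_, hI2⟩
              rw [hv2, hv]
              ring
          obtain ⟨hv, hI⟩ := hfold (PySem.List.pyRange 1 (m + 1) 1) 0 memo hInv
          refine ⟨?_, hI⟩
          rw [hv]
          simp only [dpP]
          rw [if_neg (by omega : ¬(i = n ∧ c = k)), if_neg h2]
          rw [PySem.List.foldl_add]
      refine ⟨?_, ?_⟩
      · rw [dpAM_succ_fst n m k f i h c memo hmem, hrm.1]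
      · rw [dpAM_succ_snd n m k f i h c memo hmem]
        apply InvA_insert n m k _ i h c _ ?_ hrm.2
        rw [← hf, hrm.1]

-- The common mathematical value: T t h c = dp(n - t, h, c), defined by the split recurrence.
def T (m : Int) (k : Int) : Nat → Int → Int → Int
  | 0, _, c => if c = k then 1 else 0
  | t + 1, h, c =>
    h * T m k t h c +
      (if c < k then ((PySem.List.pyRange (h + 1) (m + 1) 1).map (fun j => T m k t j (c + 1))).sum
       else 0)

-- A's dp is 0 whenever c > k
theorem dpP_of_gt (n m k : Int) : ∀ (t : Nat) (i h c : Int), k < c → dpP n m k t i h c = 0 := by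
  intro t i h c hc
  cases t with
  | zero =>
    simp only [dpP]
    rw [if_neg (by omega), ite_self]
  | succ t =>
    simp only [dpP]
    rw [if_neg (by omega), if_pos (by omega)]

-- A's dp is 0 whenever c + fuel < k (too few steps left to reach k new maxima)
theorem dpP_of_small (n m k : Int) : ∀ (t : Nat) (i h c : Int), c + t < k → dpP n m k t i h c = 0 := by
  intro t
  induction t with
  | zero =>
    intro i h c hc
    simp only [dpP]
    rw [if_neg (by omega), ite_self]
  | succ t ih =>
    intro i h c hc
    simp only [dpP]
    rw [if_neg (by omega)]
    by_cases h2 : i = n ∨ c > k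
    · rw [if_pos h2]
    rw [if_neg h2]
    rw [PySem.List.foldl_add]
    simp only [zero_add]
    apply List.sum_eq_zero
    intro x hx
    simp only [List.mem_map] at hx
    obtain ⟨j, _, rfl⟩ := hx
    apply ih
    split <;> omega

-- A's top-level dp(i, 0, 0) is 0 for k = 0 and i ≠ n: every child has c = 1 > k
theorem dpP_k0 (n m : Int) (t : Nat) (i : Int) (hi : i ≠ n) :
    dpP n m 0 (t + 1) i 0 0 = 0 := by
  simp only [dpP]
  rw [if_neg (show ¬(i = n ∧ True) from fun hh => hi hh.1),
    if_neg (by omega : ¬(i = n ∨ (0 : Int) > 0))]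
  rw [PySem.List.foldl_add, zero_add]
  apply List.sum_eq_zero
  intro x hx
  simp only [List.mem_map] at hx
  obtain ⟨j, hj, rfl⟩ := hx
  rw [PySem.List.mem_pyRange_one] at hj
  rw [if_pos (by omega : j > (0 : Int))]
  exact dpP_of_gt n m 0 t _ _ _ (by omega)

-- A-side bridge: along reachable states (i = n - t, 0 ≤ h ≤ m, 0 ≤ c ≤ k) A's dp is T
theorem dpP_eq_T (n m k : Int) : ∀ (t : Nat) (h c : Int), 0 ≤ h → h ≤ m → 0 ≤ c → c ≤ k →
    dpP n m k t (n - t) h c = T m k t h c := by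
  intro t
  induction t with
  | zero =>
    intro h c _ _ _ _
    simp [dpP, T]
  | succ t ih =>
    intro h c h0 hm c0 ck
    simp only [dpP]
    rw [if_neg (by push_cast; omega), if_neg (by push_cast; omega)]
    rw [PySem.List.foldl_add, zero_add]
    have hsplit : PySem.List.pyRange 1 (m + 1) 1
        = PySem.List.pyRange 1 (h + 1) 1 ++ PySem.List.pyRange (h + 1) (m + 1) 1 :=
      PySem.List.pyRange_one_append 1 (h + 1) (m + 1) (by omega) (by omega)
    rw [hsplit, List.map_append, List.sum_append]
    have harg : (n - (t + 1 : Nat) + 1) = n - t := by push_cast; omega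
    have hlow : ((PySem.List.pyRange 1 (h + 1) 1).map
        (fun j => dpP n m k t (n - (t + 1 : Nat) + 1) (max h j) (c + (if j > h then 1 else 0)))).sum
        = h * T m k t h c := by
      rw [List.map_congr_left (g := fun _ => T m k t h c) ?_]
      · rw [PySem.List.sum_map_const_int, PySem.List.length_pyRange_one]
        have : ((h + 1 - 1).toNat : Int) = h := by omega
        rw [this]
      · intro j hj
        rw [PySem.List.mem_pyRange_one] at hj
        rw [if_neg (by omega), max_eq_left (by omega), add_zero, harg]
        exact ih h c h0 hm c0 ck
    rw [hlow]
    simp only [T]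
    congr 1
    by_cases hck : c < k
    · rw [if_pos hck]
      refine congrArg List.sum (List.map_congr_left ?_)
      intro j hj
      rw [PySem.List.mem_pyRange_one] at hj
      rw [if_pos (by omega), max_eq_right (by omega), harg]
      exact ih j (c + 1) (by omega) (by omega) (by omega) (by omega)
    · rw [if_neg hck]
      apply List.sum_eq_zero
      intro x hx
      simp only [List.mem_map] at hx
      obtain ⟨j, hj, rfl⟩ := hx
      rw [PySem.List.mem_pyRange_one] at hj
      rw [if_pos (by omega)]
      exact dpP_of_gt n m k t _ _ _ (by omega)

-- the row the invariant assigns to colour count c after t layers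
def rowT (m k : Int) (t : Nat) (c : Int) : List Int :=
  (PySem.List.pyRange 0 (m + 1) 1).map (fun h => T m k t h c)

-- the suffix sum s maintained by B's inner loop (value after the entries above index a were added)
def sufT (m : Int) (k : Int) (t : Nat) (c : Int) (a : Int) (ck : Bool) : Int :=
  if ck then ((PySem.List.pyRange (a + 1) (m + 1) 1).map (fun j => T m k t j (c + 1))).sum else 0

theorem sufT_top (m k : Int) (t : Nat) (c : Int) (ck : Bool) : sufT m k t c m ck = 0 := by
  unfold sufT
  cases ck with
  | false => rfl
  | true => rw [PySem.List.pyRange_one_eq_nil (by omega)]; rfl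

-- B's inner loop invariant, going down from h = N - 1
theorem bRow_loop (m : Int) (k : Int) (t : Nat) (c : Int) (ck : Bool) (nxt : List Int)
    (hck : ck = true ↔ c < k) (hnxt : ck = true → nxt = rowT m k t (c + 1)) :
    ∀ (N : Nat), (N : Int) ≤ m + 1 → ∀ (acc : List Int),
    (PySem.List.pyRange ((N : Int) - 1) (-1) (-1)).foldl
      (fun (st : Int × List Int) h =>
        (if ck then st.1 + PySem.List.pyGetD nxt h 0 else st.1,
         st.2 ++ [h * PySem.List.pyGetD (rowT m k t c) h 0 + st.1]))
      (sufT m k t c ((N : Int) - 1) ck, acc)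
    = (sufT m k t c (-1) ck,
       acc ++ (PySem.List.pyRange ((N : Int) - 1) (-1) (-1)).map (fun h => T m k (t + 1) h c)) := by
  intro N
  induction N with
  | zero =>
    intro _ acc
    rw [show ((0 : Nat) : Int) - 1 = -1 by norm_num]
    rw [PySem.List.pyRange_neg_one_eq_nil (by omega)]
    simp
  | succ N ih =>
    intro hN acc
    rw [show ((N + 1 : Nat) : Int) - 1 = (N : Int) by push_cast; ring]
    rw [PySem.List.pyRange_neg_one_cons (by omega : (-1 : Int) < (N : Int))]
    simp only [List.foldl_cons]
    have hrow : PySem.List.pyGetD (rowT m k t c) (N : Int) 0 = T m k t (N : Int) c := by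
      unfold rowT
      exact PySem.List.pyGetD_map_pyRange_of_nonneg _ _ _ _ (by omega) (by omega)
    have hstep1 : (if ck then sufT m k t c (N : Int) ck + PySem.List.pyGetD nxt (N : Int) 0
        else sufT m k t c (N : Int) ck) = sufT m k t c ((N : Int) - 1) ck := by
      cases ck with
      | false => rfl
      | true =>
        rw [hnxt rfl]
        have hget : PySem.List.pyGetD (rowT m k t (c + 1)) (N : Int) 0 = T m k t (N : Int) (c + 1) := by
          unfold rowT
          exact PySem.List.pyGetD_map_pyRange_of_nonneg _ _ _ _ (by omega) (by omega)
        rw [hget]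
        unfold sufT
        simp only [if_true]
        rw [show (N : Int) - 1 + 1 = (N : Int) by ring]
        rw [PySem.List.pyRange_one_cons (by omega : (N : Int) < m + 1)]
        rw [List.map_cons, List.sum_cons]
        ring
    have hstep2 : (N : Int) * PySem.List.pyGetD (rowT m k t c) (N : Int) 0
        + sufT m k t c (N : Int) ck = T m k (t + 1) (N : Int) c := by
      rw [hrow]
      simp only [T]
      congr 1
      unfold sufT
      by_cases h : c < k
      · rw [if_pos (hck.mpr h), if_pos h]
      · rw [if_neg h, if_neg (fun hh => h (hck.mp hh))]
    rw [hstep1, hstep2]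
    rw [ih (by omega) (acc ++ [T m k (t + 1) (N : Int) c])]
    rw [List.map_cons, List.append_assoc]
    rfl

-- bRow on invariant rows produces the next invariant row
theorem bRow_eq (m : Int) (k : Int) (t : Nat) (c : Int) (hm : 0 ≤ m) :
    bRow (rowT m k t c) (if c < k then rowT m k t (c + 1) else []) m (decide (c < k))
      = rowT m k (t + 1) c := by
  unfold bRow
  have hloop := bRow_loop m k t c (decide (c < k)) (if c < k then rowT m k t (c + 1) else [])
    (by simp) (fun h => by rw [if_pos (by simpa using h)]) ((m + 1).toNat)
    (by omega) []
  rw [show (((m + 1).toNat : Nat) : Int) - 1 = m by omega] at hloop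
  rw [show ((0 : Int), ([] : List Int)) = (sufT m k t c m (decide (c < k)), ([] : List Int)) by
    rw [sufT_top]]
  rw [hloop]
  simp only [List.nil_append]
  rw [PySem.List.pyRange_neg_one_eq_reverse]
  rw [show (-1 : Int) + 1 = 0 by ring]
  rw [List.map_reverse, List.reverse_reverse]
  rfl

-- bStep on the invariant table produces the next invariant table
theorem bStep_eq (m : Int) (k : Int) (t : Nat) (hm : 0 ≤ m) :
    bStep m k ((PySem.List.pyRange 0 (k + 1) 1).map (fun c => rowT m k t c))
      = (PySem.List.pyRange 0 (k + 1) 1).map (fun c => rowT m k (t + 1) c) := by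
  unfold bStep
  rw [PySem.List.foldl_append_singleton_eq_map, List.nil_append]
  apply List.map_congr_left
  intro c hc
  rw [PySem.List.mem_pyRange_one] at hc
  have h1 : PySem.List.pyGetD ((PySem.List.pyRange 0 (k + 1) 1).map (fun c => rowT m k t c)) c []
      = rowT m k t c :=
    PySem.List.pyGetD_map_pyRange_of_nonneg _ _ _ _ (by omega) (by omega)
  have h2 : (if c < k then
        PySem.List.pyGetD ((PySem.List.pyRange 0 (k + 1) 1).map (fun c => rowT m k t c)) (c + 1) []
      else []) = (if c < k then rowT m k t (c + 1) else []) := by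
    by_cases h : c < k
    · rw [if_pos h, if_pos h]
      exact PySem.List.pyGetD_map_pyRange_of_nonneg _ _ _ _ (by omega) (by omega)
    · rw [if_neg h, if_neg h]
  rw [h1, h2, bRow_eq m k t c hm]

-- the outer layer loop
theorem bIter_eq (m : Int) (k : Int) (hm : 0 ≤ m) : ∀ (t : Nat),
    (PySem.List.pyRange 0 (t : Int) 1).foldl (fun dp _ => bStep m k dp)
      ((PySem.List.pyRange 0 (k + 1) 1).map (fun c => rowT m k 0 c))
    = (PySem.List.pyRange 0 (k + 1) 1).map (fun c => rowT m k t c) := by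
  intro t
  induction t with
  | zero =>
    rw [show ((0 : Nat) : Int) = 0 by norm_num]
    rw [show PySem.List.pyRange 0 (0 : Int) 1 = [] from PySem.List.pyRange_one_eq_nil (by omega)]
    rfl
  | succ t ih =>
    rw [show ((t + 1 : Nat) : Int) = (t : Int) + 1 by push_cast; ring]
    rw [show PySem.List.pyRange 0 ((t : Int) + 1) 1 = PySem.List.pyRange 0 (t : Int) 1 ++ [(t : Int)]
      from PySem.List.pyRange_one_succ_right (by omega)]
    rw [List.foldl_append, ih]
    simp only [List.foldl_cons, List.foldl_nil]
    exact bStep_eq m k t hm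

-- the initial table is the invariant at t = 0
theorem base_eq (m : Int) (k : Int) (c : Int) :
    List.replicate (m + 1).toNat (if c = k then (1 : Int) else 0) = rowT m k 0 c := by
  unfold rowT
  simp only [T]
  rw [List.map_const', PySem.List.length_pyRange_one]
  norm_num

-- ===== VERDICT (by name: the statement is the Claim_ definition above) =====
theorem numOfArrays_top_down_spec : Claim_equal_numOfArrays_top_down := by
  intro n m k _ _
  unfold Spec_numOfArrays_top_down numOfArrays_top_down numOfArrays_top_down_alt
  by_cases hn0 : n = 0
  · subst hn0
    rw [if_pos rfl, show (0 : Int).toNat = 0 from rfl]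
    rw [(dpAM_correct 0 m k 0 0 0 0 ∅ (le_refl 0) (le_refl 0) (by omega) (InvA_empty 0 m k)).1]
    by_cases hk : k = 0
    · subst hk
      rw [if_pos rfl]
      simp [dpP]
    · rw [if_neg hk]
      simp only [dpP]
      rw [if_neg (show ¬(True ∧ (0 : Int) = k) from fun hh => hk hh.2.symm)]
      rw [if_pos (Or.inl trivial)]
      decide
  · rw [if_neg hn0]
    by_cases hneg : n < 0
    · -- n < 0: dp(0,0,0) is evaluated at exhausted fuel (n.toNat = 0) and returns 0
      rw [if_pos (Or.inl hneg)]
      rw [show n.toNat = 0 from by omega]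
      rw [dpAM_zero_fst n m k 0 0 0 ∅ (by simp)]
      simp only [dpP]
      rw [if_neg (show ¬((0 : Int) = n ∧ (0 : Int) = k) from fun hh => hn0 hh.1.symm)]
      by_cases hk2 : (0 : Int) > k
      · rw [if_pos (Or.inr hk2)]
        decide
      · rw [if_neg (by omega : ¬((0 : Int) = n ∨ (0 : Int) > k))]
        decide
    · have hnpos : 0 < n := by omega
      rw [(dpAM_correct n m k n.toNat 0 0 0 ∅ (le_refl 0) (by omega) (by omega)
        (InvA_empty n m k)).1]
      obtain ⟨t, ht⟩ : ∃ t : Nat, n.toNat = t + 1 := ⟨n.toNat - 1, by omega⟩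
      by_cases hk : k ≤ 0
      · rw [if_pos (Or.inr (Or.inr (Or.inl hk)))]
        by_cases hk0 : k = 0
        · subst hk0
          rw [ht, dpP_k0 n m t 0 (fun hh => hn0 hh.symm)]
          decide
        · -- k < 0: c = 0 > k at the top call
          rw [ht]
          simp only [dpP]
          rw [if_neg (by omega), if_pos (by omega)]
          decide
      · by_cases hm : m ≤ 0
        · rw [if_pos (Or.inr (Or.inl hm)), ht]
          simp only [dpP]
          rw [if_neg (by omega), if_neg (by omega)]
          rw [show PySem.List.pyRange 1 (m + 1) 1 = [] from PySem.List.pyRange_one_eq_nil (by omega),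
            List.foldl_nil]
          decide
        · by_cases hkn : k > n
          · rw [if_pos (Or.inr (Or.inr (Or.inr hkn)))]
            rw [dpP_of_small n m k n.toNat 0 0 0 (by omega)]
            decide
          · -- main case: n > 0, m ≥ 1, 1 ≤ k ≤ n
            rw [if_neg (by omega)]
            simp only []
            have hA : dpP n m k n.toNat 0 0 0 = T m k n.toNat 0 0 := by
              have h := dpP_eq_T n m k n.toNat 0 0 (le_refl 0) (by omega) (le_refl 0) (by omega)
              rw [show n - (n.toNat : Int) = 0 from by omega] at h
              exact h
            have hbase : (PySem.List.pyRange 0 (k + 1) 1).map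
                (fun c => List.replicate (m + 1).toNat (if c = k then (1 : Int) else 0))
                = (PySem.List.pyRange 0 (k + 1) 1).map (fun c => rowT m k 0 c) :=
              List.map_congr_left (fun c _ => base_eq m k c)
            have hfold := bIter_eq m k (by omega) n.toNat
            rw [show ((n.toNat : Nat) : Int) = n from by omega] at hfold
            rw [hA, hbase, hfold]
            rw [PySem.List.pyGetD_map_pyRange_of_nonneg _ _ _ _ (le_refl 0) (by omega)]
            have hg2 : PySem.List.pyGetD (rowT m k n.toNat 0) 0 0 = T m k n.toNat 0 0 := by
              unfold rowT
              exact PySem.List.pyGetD_map_pyRange_of_nonneg _ _ _ _ (le_refl 0) (by omega)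
            rw [hg2]
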